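-- pv_equiv track=rewrite | github.com/MikeSWang/Harmonia | harmonia/collections/utils.py | allocate_tasks
-- ===== SOURCE A (Python) =====
-- def allocate_tasks(total_task, total_proc):
--     """Allocate tasks to processes for parallel computation.
--
--     If `total_proc` processes share `total_task` tasks, then this decides
--     the numbers of tasks, `tasks`, different processes receive: the
--     rank-``i`` process receives ``tasks[i]`` many tasks.
--
--     Parameters
--     ----------
--     total_task : int
--         Total number of tasks.
--     total_proc : int
--         Total number of processes.
--
--     Returns
--     -------
--     tasks : list of int
--         Number of tasks for each process.
--
--     Raises
--     ------
--     TypeError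
--         If `total_task` or `total_proc` is not an integer.
--
--     """
--     try:
--         total_task, total_proc = map(int, (total_task, total_proc))
--     except TypeError:
--         raise TypeError(
--             "`total_task` and `total_proc` must have integer values. "
--         )
--
--     num_task_remaining, num_proc_remaining, tasks = total_task, total_proc, []
--
--     while num_task_remaining > 0:
--         num_task_assigned = num_task_remaining // num_proc_remaining
--         tasks.append(num_task_assigned)
--         num_task_remaining -= num_task_assigned
--         num_proc_remaining -= 1
--
--     return tasks
-- ===== SOURCE B (Python) =====
-- def allocate_tasks(total_task, total_proc):
--     try:
--         total_task, total_proc = map(int, (total_task, total_proc))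
--     except TypeError:
--         raise TypeError(
--             "`total_task` and `total_proc` must have integer values. "
--         )
--
--     if total_task <= 0:
--         return []
--     q, r = divmod(total_task, total_proc)
--     return [q] * (total_proc - r) + [q + 1] * r
-- ===== Notes on version B (the rewrite author's own statement) =====
-- stated objective: faster
-- what changed: Replaced the greedy per-process while loop (recomputing a floor division each iteration) with a single divmod and a closed-form list [q]*(p-r)+[q+1]*r, behind the natural guard total_task <= 0 -> [].
import Mathlib
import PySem

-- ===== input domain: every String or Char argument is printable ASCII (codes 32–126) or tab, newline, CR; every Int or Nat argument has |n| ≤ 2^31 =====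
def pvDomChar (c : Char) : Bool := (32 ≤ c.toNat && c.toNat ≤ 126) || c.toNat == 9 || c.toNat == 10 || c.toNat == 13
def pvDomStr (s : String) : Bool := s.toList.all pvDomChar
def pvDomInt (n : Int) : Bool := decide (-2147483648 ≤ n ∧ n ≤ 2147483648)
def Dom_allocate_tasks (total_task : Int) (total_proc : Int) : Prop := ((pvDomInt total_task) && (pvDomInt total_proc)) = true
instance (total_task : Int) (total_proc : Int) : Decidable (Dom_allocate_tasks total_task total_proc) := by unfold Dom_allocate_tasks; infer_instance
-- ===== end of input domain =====

-- B replaces A's greedy per-process while loop with one divmod and a closed-form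
-- list [q]*(p-r) ++ [q+1]*r; equivalence is claimed on Pre_ (A's non-raising,
-- terminating inputs).

-- ===== PORT A =====
-- A's while loop, transliterated with fuel = total_proc.toNat; inside Pre_ the
-- loop runs at most total_proc iterations, so the fuel is never exhausted there.
def allocate_tasks_loop : Nat → Int → Int → List Int → List Int
  | 0, _, _, tasks => tasks
  | fuel + 1, num_task_remaining, num_proc_remaining, tasks =>
    if num_task_remaining > 0 then
      let num_task_assigned := PySem.Int.floordiv num_task_remaining num_proc_remaining
      allocate_tasks_loop fuel (num_task_remaining - num_task_assigned)
        (num_proc_remaining - 1) (tasks ++ [num_task_assigned])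
    else tasks

def allocate_tasks (total_task : Int) (total_proc : Int) : List Int :=
  allocate_tasks_loop total_proc.toNat total_task total_proc []

-- ===== PORT B =====
def allocate_tasks_alt (total_task : Int) (total_proc : Int) : List Int :=
  if total_task ≤ 0 then []
  else
    let q := PySem.Int.floordiv total_task total_proc
    let r := PySem.Int.mod total_task total_proc
    List.replicate (total_proc - r).toNat q ++ List.replicate r.toNat (q + 1)

-- ===== PRECONDITION & SPEC =====
-- Pre_ excludes total_task > 0 with total_proc ≤ 0: there A raises
-- ZeroDivisionError (total_proc = 0) or loops forever (total_proc < 0).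
def Pre_allocate_tasks (total_task : Int) (total_proc : Int) : Prop :=
  total_task ≤ 0 ∨ 0 < total_proc
instance (total_task : Int) (total_proc : Int) : Decidable (Pre_allocate_tasks total_task total_proc) := by unfold Pre_allocate_tasks; infer_instance
def pvWitness_allocate_tasks : Int × Int := (7, 3)

def Spec_allocate_tasks (total_task : Int) (total_proc : Int) (out : List Int) : Prop := out = allocate_tasks_alt total_task total_proc
instance (total_task : Int) (total_proc : Int) (out : List Int) : Decidable (Spec_allocate_tasks total_task total_proc out) := by unfold Spec_allocate_tasks; infer_instance

-- ===== CLAIM (what is proved, stated in full; the proofs are below) =====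
def Claim_equal_allocate_tasks : Prop := ∀ (total_task : Int) (total_proc : Int), Dom_allocate_tasks total_task total_proc → Pre_allocate_tasks total_task total_proc → Spec_allocate_tasks total_task total_proc (allocate_tasks total_task total_proc)

-- ===== LEMMAS AND PROOFS =====

-- Closed form of one row of the distribution, for positive divisor, in ediv/emod terms.
def pvClosed (t p : Int) : List Int :=
  List.replicate (p - t % p).toNat (t / p) ++ List.replicate (t % p).toNat (t / p + 1)

lemma pvLoop_closed : ∀ (n : Nat) (t : Int) (acc : List Int), 0 < t →
    allocate_tasks_loop (n + 1) t ((n : Int) + 1) acc = acc ++ pvClosed t ((n : Int) + 1) := by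
  intro n
  induction n with
  | zero =>
    intro t acc ht
    simp only [allocate_tasks_loop, if_pos ht]
    rw [PySem.Int.floordiv_eq_ediv_of_pos (by omega)]
    simp [pvClosed]
  | succ n ih =>
    intro t acc ht
    rw [allocate_tasks_loop.eq_2, if_pos (by omega : t > 0)]
    have hcast : ((n + 1 : Nat) : Int) + 1 = ((n : Int) + 1) + 1 := by push_cast; ring
    rw [hcast]
    have hp : (0 : Int) < (n : Int) + 1 + 1 := by positivity
    rw [PySem.Int.floordiv_eq_ediv_of_pos hp]
    set p : Int := (n : Int) + 1 + 1 with hpdef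
    set q : Int := t / p with hq
    set r : Int := t % p with hr
    have hrange : 0 ≤ r ∧ r < p := ⟨Int.emod_nonneg t (by omega), Int.emod_lt_of_pos t hp⟩
    have ht' : t = q * p + r := by rw [hq, hr]; rw [Int.ediv_mul_add_emod]
    have harg : t - q = q * (p - 1) + r := by rw [ht']; ring_nf
    have hpm1 : p - 1 = (n : Int) + 1 := by omega
    have hq0 : 0 ≤ q := Int.ediv_nonneg (by omega) (by omega)
    rw [hpm1]
    by_cases hlast : r = p - 1
    · -- the extra unit goes to every remaining process
      have ht2 : t - q = (q + 1) * (p - 1) := by rw [harg, hlast]; ring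
      have htpos : 0 < t - q := by
        rw [ht2]; exact mul_pos (by omega) (by omega)
      rw [ih (t - q) (acc ++ [q]) htpos]
      have hdiv : (t - q) / ((n : Int) + 1) = q + 1 := by
        rw [← hpm1, ht2, Int.mul_ediv_cancel _ (by omega)]
      have hmod : (t - q) % ((n : Int) + 1) = 0 := by
        rw [← hpm1, ht2]; exact Int.mul_emod_left _ _
      have h1 : ((n : Int) + 1 - 0).toNat = r.toNat := by omega
      have h2 : (p - r).toNat = 1 := by omega
      simp only [pvClosed, hdiv, hmod, ← hq, ← hr, h1, h2]
      simp [List.append_assoc]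
    · -- r < p - 1 : quotient and remainder are unchanged for p - 1 processes
      have hrlt : r < p - 1 := by omega
      have htpos : 0 < t - q := by
        rcases (by omega : q = 0 ∨ 0 < q) with h0 | h0
        · have htr : t = r := by rw [ht', h0]; ring
          omega
        · have hqp : 0 < q * (p - 1) := mul_pos h0 (by omega)
          linarith [harg, hrange.1]
      rw [ih (t - q) (acc ++ [q]) htpos]
      have hdiv : (t - q) / ((n : Int) + 1) = q := by
        rw [← hpm1, harg, add_comm, Int.add_mul_ediv_right _ _ (by omega : p - 1 ≠ 0),
          Int.ediv_eq_zero_of_lt (by omega) hrlt, zero_add]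
      have hmod : (t - q) % ((n : Int) + 1) = r := by
        rw [← hpm1, harg, mul_comm, add_comm, Int.add_mul_emod_self_left, Int.emod_eq_of_lt (by omega) hrlt]
      have h1 : (p - r).toNat = (((n : Int) + 1) - r).toNat + 1 := by omega
      simp only [pvClosed, hdiv, hmod, ← hq, ← hr, h1, List.replicate_succ]
      simp [List.append_assoc]

-- ===== VERDICT (by name: the statement is the Claim_ definition above) =====
theorem allocate_tasks_spec : Claim_equal_allocate_tasks := by
  unfold Claim_equal_allocate_tasks
  intro t p _ hpre
  unfold Spec_allocate_tasks allocate_tasks allocate_tasks_alt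
  by_cases ht : t ≤ 0
  · -- A's loop exits immediately; B returns []
    rw [if_pos ht]
    cases hn : p.toNat with
    | zero => simp [allocate_tasks_loop]
    | succ n => simp [allocate_tasks_loop, show ¬ t > 0 by omega]
  · have htp : 0 < t := by omega
    have hp : 0 < p := by rcases hpre with h | h <;> omega
    rw [if_neg ht]
    obtain ⟨n, hn⟩ : ∃ n : Nat, p = (n : Int) + 1 := ⟨(p - 1).toNat, by omega⟩
    have hfuel : p.toNat = n + 1 := by omega
    rw [hfuel, hn, pvLoop_closed n t [] htp]
    rw [PySem.Int.floordiv_eq_ediv_of_pos (by omega), PySem.Int.mod_eq_emod_of_pos (by omega)]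
    simp [pvClosed]
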